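-- pv_equiv track=rewrite | github.com/fabriziosalmi/websites-monitor | api.py | _categorize_check
-- ===== SOURCE A (Python) =====
-- def _categorize_check(check_name: str) -> str:
--     """Categorize a check based on its name."""
--     check_lower = check_name.lower()
--
--     if any(word in check_lower for word in ['ssl', 'security', 'hsts', 'xss', 'cors', 'breach', 'blacklist']):
--         return "security"
--     elif any(word in check_lower for word in ['pagespeed', 'load', 'performance', 'cdn', 'brotli', 'minification']):
--         return "performance"
--     elif any(word in check_lower for word in ['seo', 'sitemap', 'robot', 'open_graph', 'alt_tags', 'semantic']):
--         return "seo"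
--     elif any(word in check_lower for word in ['accessibility', 'mobile', 'internationalization', 'i18n']):
--         return "accessibility"
--     elif any(word in check_lower for word in ['privacy', 'cookie', 'tracking', 'floc', 'whois']):
--         return "privacy"
--     elif any(word in check_lower for word in ['domain', 'dns', 'subdomain', 'email']):
--         return "domain"
--     else:
--         return "other"
-- ===== SOURCE B (Python) =====
-- _CATEGORIES = ["security", "performance", "seo", "accessibility", "privacy", "domain", "other"]
--
-- # Every keyword paired with the rank of its category (0 = highest priority).
-- _KEYWORD_RANK = [
--     ("ssl", 0), ("security", 0), ("hsts", 0), ("xss", 0), ("cors", 0), ("breach", 0), ("blacklist", 0),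
--     ("pagespeed", 1), ("load", 1), ("performance", 1), ("cdn", 1), ("brotli", 1), ("minification", 1),
--     ("seo", 2), ("sitemap", 2), ("robot", 2), ("open_graph", 2), ("alt_tags", 2), ("semantic", 2),
--     ("accessibility", 3), ("mobile", 3), ("internationalization", 3), ("i18n", 3),
--     ("privacy", 4), ("cookie", 4), ("tracking", 4), ("floc", 4), ("whois", 4),
--     ("domain", 5), ("dns", 5), ("subdomain", 5), ("email", 5),
-- ]
--
--
-- def _categorize_check(check_name: str) -> str:
--     """Categorize a check based on its name."""
--     check_lower = check_name.lower()
--     best = len(_CATEGORIES) - 1  # rank of "other"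
--     for keyword, rank in _KEYWORD_RANK:
--         if keyword in check_lower:
--             best = min(best, rank)
--     return _CATEGORIES[best]
-- ===== Notes on version B (the rewrite author's own statement) =====
-- stated objective: alternative
-- what changed: Instead of six chained if/elif branches with early return, B folds once over a flat (keyword, category-rank) list keeping the minimum matching rank and indexes the category table with it.
import Mathlib
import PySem

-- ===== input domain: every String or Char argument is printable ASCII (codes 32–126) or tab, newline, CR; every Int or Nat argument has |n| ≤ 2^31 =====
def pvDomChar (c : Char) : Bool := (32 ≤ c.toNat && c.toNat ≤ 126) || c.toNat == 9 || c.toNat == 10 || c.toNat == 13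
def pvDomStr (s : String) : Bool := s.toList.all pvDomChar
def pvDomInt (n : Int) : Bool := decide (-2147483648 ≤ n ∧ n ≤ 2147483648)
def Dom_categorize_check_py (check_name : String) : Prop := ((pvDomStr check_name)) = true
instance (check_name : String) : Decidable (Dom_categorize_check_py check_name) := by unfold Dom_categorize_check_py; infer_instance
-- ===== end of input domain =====

-- B replaces A's prioritized if/elif chain by a min-rank aggregation: one fold over a flat
-- (keyword, category-rank) list keeps the smallest matching rank, then indexes a category table
-- (alternative decomposition; same value because ranks follow A's branch order).


-- ===== PORT A =====
def categorize_check_py (check_name : String) : String :=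
  let check_lower := PySem.Str.lower check_name
  if ["ssl", "security", "hsts", "xss", "cors", "breach", "blacklist"].any
      (fun word => PySem.Str.isIn word check_lower) then "security"
  else if ["pagespeed", "load", "performance", "cdn", "brotli", "minification"].any
      (fun word => PySem.Str.isIn word check_lower) then "performance"
  else if ["seo", "sitemap", "robot", "open_graph", "alt_tags", "semantic"].any
      (fun word => PySem.Str.isIn word check_lower) then "seo"
  else if ["accessibility", "mobile", "internationalization", "i18n"].any
      (fun word => PySem.Str.isIn word check_lower) then "accessibility"
  else if ["privacy", "cookie", "tracking", "floc", "whois"].any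
      (fun word => PySem.Str.isIn word check_lower) then "privacy"
  else if ["domain", "dns", "subdomain", "email"].any
      (fun word => PySem.Str.isIn word check_lower) then "domain"
  else "other"

-- ===== PORT B =====
def pvCategories : List String :=
  ["security", "performance", "seo", "accessibility", "privacy", "domain", "other"]

def pvKeywordRank : List (String × Nat) :=
  [("ssl", 0), ("security", 0), ("hsts", 0), ("xss", 0), ("cors", 0), ("breach", 0), ("blacklist", 0),
   ("pagespeed", 1), ("load", 1), ("performance", 1), ("cdn", 1), ("brotli", 1), ("minification", 1),
   ("seo", 2), ("sitemap", 2), ("robot", 2), ("open_graph", 2), ("alt_tags", 2), ("semantic", 2),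
   ("accessibility", 3), ("mobile", 3), ("internationalization", 3), ("i18n", 3),
   ("privacy", 4), ("cookie", 4), ("tracking", 4), ("floc", 4), ("whois", 4),
   ("domain", 5), ("dns", 5), ("subdomain", 5), ("email", 5)]

-- `best` stays in 0..6, so `_CATEGORIES[best]` never raises; getD is exact here.
def categorize_check_py_alt (check_name : String) : String :=
  let check_lower := PySem.Str.lower check_name
  let best := pvKeywordRank.foldl
    (fun best kr => if PySem.Str.isIn kr.1 check_lower then min best kr.2 else best)
    (pvCategories.length - 1)
  pvCategories.getD best "other"

-- ===== PRECONDITION & SPEC =====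
def Spec_categorize_check_py (check_name : String) (out : String) : Prop := out = categorize_check_py_alt check_name
instance (check_name : String) (out : String) : Decidable (Spec_categorize_check_py check_name out) := by unfold Spec_categorize_check_py; infer_instance

-- ===== CLAIM (what is proved, stated in full; the proofs are below) =====
def Claim_equal_categorize_check_py : Prop := ∀ (check_name : String), Dom_categorize_check_py check_name → Spec_categorize_check_py check_name (categorize_check_py check_name)

-- ===== LEMMAS AND PROOFS =====

-- Folding min over one category's keywords (all with the same rank p): the accumulator
-- becomes `min b p` iff some keyword matches, else stays `b`.
theorem pvSegFold (s : String) (p : Nat) (kws : List String) (b : Nat) :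
    List.foldl (fun best kr => if PySem.Str.isIn kr.1 s then min best kr.2 else best) b
      (kws.map (fun k => (k, p)))
      = if kws.any (fun word => PySem.Str.isIn word s) then min b p else b := by
  induction kws generalizing b with
  | nil => simp
  | cons k rest ih =>
    simp only [List.map_cons, List.foldl_cons, List.any_cons]
    by_cases h : PySem.Str.isIn k s = true
    · rw [if_pos h, ih]
      simp only [h, Bool.true_or, if_true]
      split
      · rw [min_assoc, min_self]
      · rfl
    · have h' : PySem.Str.isIn k s = false := by simpa using h
      rw [if_neg h, ih]
      simp only [h', Bool.false_or]

-- ===== VERDICT (by name: the statement is the Claim_ definition above) =====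
theorem categorize_check_py_spec : Claim_equal_categorize_check_py := by
  intro check_name _
  show categorize_check_py check_name = categorize_check_py_alt check_name
  simp only [categorize_check_py, categorize_check_py_alt]
  have hflat : pvKeywordRank =
      (["ssl", "security", "hsts", "xss", "cors", "breach", "blacklist"].map (fun k => (k, (0 : Nat)))) ++
      (["pagespeed", "load", "performance", "cdn", "brotli", "minification"].map (fun k => (k, 1))) ++
      (["seo", "sitemap", "robot", "open_graph", "alt_tags", "semantic"].map (fun k => (k, 2))) ++
      (["accessibility", "mobile", "internationalization", "i18n"].map (fun k => (k, 3))) ++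
      (["privacy", "cookie", "tracking", "floc", "whois"].map (fun k => (k, 4))) ++
      (["domain", "dns", "subdomain", "email"].map (fun k => (k, 5))) := by rfl
  rw [hflat, List.foldl_append, List.foldl_append, List.foldl_append, List.foldl_append,
    List.foldl_append, pvSegFold, pvSegFold, pvSegFold, pvSegFold, pvSegFold, pvSegFold]
  generalize (["ssl", "security", "hsts", "xss", "cors", "breach", "blacklist"].any
      (fun word => PySem.Str.isIn word (PySem.Str.lower check_name))) = a1
  generalize (["pagespeed", "load", "performance", "cdn", "brotli", "minification"].any
      (fun word => PySem.Str.isIn word (PySem.Str.lower check_name))) = a2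
  generalize (["seo", "sitemap", "robot", "open_graph", "alt_tags", "semantic"].any
      (fun word => PySem.Str.isIn word (PySem.Str.lower check_name))) = a3
  generalize (["accessibility", "mobile", "internationalization", "i18n"].any
      (fun word => PySem.Str.isIn word (PySem.Str.lower check_name))) = a4
  generalize (["privacy", "cookie", "tracking", "floc", "whois"].any
      (fun word => PySem.Str.isIn word (PySem.Str.lower check_name))) = a5
  generalize (["domain", "dns", "subdomain", "email"].any
      (fun word => PySem.Str.isIn word (PySem.Str.lower check_name))) = a6
  cases a1 <;> cases a2 <;> cases a3 <;> cases a4 <;> cases a5 <;> cases a6 <;> rfl
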